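-- pv_equiv track=rewrite | github.com/symerio/SiQt | SiQt/siqt/dep_resolv.py | dependency_graph
-- ===== SOURCE A (Python) =====
-- def dependency_graph(key, storage):
--     out = []
--     if key in storage:
--         fields = storage[key]
--         out += fields
--         for pkey in fields:
--             new_fields = dependency_graph(pkey, storage)
--             if new_fields:
--                 out += new_fields
--     return out
-- ===== SOURCE B (Python) =====
-- def dependency_graph(key, storage):
--     # Memoized DFS over the dependency DAG: each node's full expansion is
--     # computed once and cached, instead of being recomputed for every path.
--     cache = {}
--
--     def expand(k):
--         if k in cache:
--             return cache[k]
--         if k not in storage: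
--             return []
--         fields = storage[k]
--         res = list(fields)
--         for p in fields:
--             res.extend(expand(p))
--         cache[k] = res
--         return res
--
--     return expand(key)
-- ===== Notes on version B (the rewrite author's own statement) =====
-- stated objective: alternative
-- what changed: A re-expands every node once per path reaching it by plain recursion; B does a memoized depth-first expansion with a cache dict so each node's expansion list is computed exactly once.
import Mathlib
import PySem

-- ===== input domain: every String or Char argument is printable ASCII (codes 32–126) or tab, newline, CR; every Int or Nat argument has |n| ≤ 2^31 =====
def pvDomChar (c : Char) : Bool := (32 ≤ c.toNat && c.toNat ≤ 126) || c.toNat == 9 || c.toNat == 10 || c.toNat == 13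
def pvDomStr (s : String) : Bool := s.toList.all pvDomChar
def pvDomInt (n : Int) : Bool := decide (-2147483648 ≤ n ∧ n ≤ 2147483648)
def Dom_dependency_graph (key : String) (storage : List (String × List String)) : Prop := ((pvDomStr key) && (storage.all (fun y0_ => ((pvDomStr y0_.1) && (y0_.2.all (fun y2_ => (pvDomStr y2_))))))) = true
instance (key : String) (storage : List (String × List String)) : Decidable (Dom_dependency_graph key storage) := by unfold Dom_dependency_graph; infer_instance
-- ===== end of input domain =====

-- B replaces A's path-by-path recursive expansion with a memoized depth-first
-- expansion: each node's expansion list is computed once and cached in a dict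
-- (objective: alternative structure; same return value, measured same cost).

-- ===== PORT A =====
-- fuel guard only makes the recursion total; under Pre_ (acyclic storage) the
-- fuel storage.length + 1 is never exhausted, so this is A's computation exactly.
def pvDepA : Nat → String → List (String × List String) → List String
  | 0, _, _ => []
  | n + 1, key, storage =>
    match List.lookup key storage with
    | none => []
    | some fields =>
      fields.foldl (fun out pkey =>
        let new_fields := pvDepA n pkey storage
        if new_fields ≠ [] then out ++ new_fields else out) ([] ++ fields)

def dependency_graph (key : String) (storage : List (String × List String)) : List String :=
  pvDepA (storage.length + 1) key storage

-- ===== PORT B =====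
-- transliteration of Source B: expand threads the cache dict through the loop.
def pvDepB : Nat → PySem.Dict String (List String) → String → List (String × List String) →
    List String × PySem.Dict String (List String)
  | 0, cache, _, _ => ([], cache)
  | n + 1, cache, k, storage =>
    match PySem.Dict.get? cache k with
    | some v => (v, cache)
    | none =>
      match List.lookup k storage with
      | none => ([], cache)
      | some fields =>
        let st := fields.foldl (fun (st : List String × PySem.Dict String (List String)) p =>
          let q := pvDepB n st.2 p storage
          (st.1 ++ q.1, q.2)) (fields, cache)
        (st.1, st.2.insert k st.1)

def dependency_graph_alt (key : String) (storage : List (String × List String)) : List String :=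
  (pvDepB (storage.length + 1) PySem.Dict.empty key storage).1

-- ===== PRECONDITION & SPEC =====
-- graph helpers for the precondition (about the input graph, not the ports)
def pvChildren (storage : List (String × List String)) (k : String) : List String :=
  (List.lookup k storage).getD []

def pvExpand (storage : List (String × List String)) (S : Finset String) : Finset String :=
  S ∪ S.biUnion (fun k => (pvChildren storage k).toFinset)

def pvGrow (storage : List (String × List String)) : Nat → Finset String → Finset String
  | 0, S => S
  | n + 1, S => pvGrow storage n (pvExpand storage S)

-- pvReach storage k = all nodes reachable from k in the dependency graph
def pvReach (storage : List (String × List String)) (k : String) : Finset String :=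
  pvGrow storage (storage.length + 1) {k}

-- Pre_ excludes exactly the inputs where a dependency cycle is reachable from
-- key: there Python A recurses forever (RecursionError), so no value is claimed.
def Pre_dependency_graph (key : String) (storage : List (String × List String)) : Prop :=
  ∀ k ∈ storage.map Prod.fst, k ∈ pvReach storage key →
    ∀ p ∈ pvChildren storage k, k ∉ pvReach storage p

instance (key : String) (storage : List (String × List String)) : Decidable (Pre_dependency_graph key storage) := by
  unfold Pre_dependency_graph; infer_instance

def pvWitness_dependency_graph : String × (List (String × List String)) :=
  ("a", [("a", ["b", "c"]), ("b", ["c"]), ("c", [])])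

def Spec_dependency_graph (key : String) (storage : List (String × List String)) (out : List String) : Prop := out = dependency_graph_alt key storage
instance (key : String) (storage : List (String × List String)) (out : List String) : Decidable (Spec_dependency_graph key storage out) := by unfold Spec_dependency_graph; infer_instance

-- ===== CLAIM (what is proved, stated in full; the proofs are below) =====
def Claim_equal_dependency_graph : Prop := ∀ (key : String) (storage : List (String × List String)), Dom_dependency_graph key storage → Pre_dependency_graph key storage → Spec_dependency_graph key storage (dependency_graph key storage)

-- ===== LEMMAS AND PROOFS =====

-- the storage keys as a finite set
def pvKeysF (storage : List (String × List String)) : Finset String :=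
  (storage.map Prod.fst).toFinset

-- rank of a node: number of storage keys reachable from it (the termination measure)
def pvRank (storage : List (String × List String)) (k : String) : Nat :=
  (pvReach storage k ∩ pvKeysF storage).card

-- canonical value of A's expansion at a node (computed with just enough fuel)
def pvVal (storage : List (String × List String)) (k : String) : List String :=
  pvDepA (pvRank storage k + 1) k storage

def pvInv (storage : List (String × List String)) (cache : PySem.Dict String (List String)) : Prop :=
  ∀ j v, PySem.Dict.get? cache j = some v → v = pvVal storage j

theorem pv_lookup_isSome (l : List (String × List String)) (k : String) :
    (List.lookup k l).isSome = true ↔ k ∈ l.map Prod.fst := by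
  induction l with
  | nil => simp [List.lookup]
  | cons h t ih =>
    simp only [List.lookup, List.map_cons, List.mem_cons]
    by_cases hk : k = h.1
    · simp [hk]
    · have : (k == h.1) = false := by simpa using hk
      simp [this, ih, hk]

theorem pv_children_nil (storage : List (String × List String)) (k : String)
    (h : k ∉ storage.map Prod.fst) : pvChildren storage k = [] := by
  unfold pvChildren
  cases hl : List.lookup k storage with
  | none => rfl
  | some v =>
    exact absurd ((pv_lookup_isSome storage k).mp (by simp [hl])) h

theorem pv_subset_expand (storage : List (String × List String)) (S : Finset String) :
    S ⊆ pvExpand storage S := Finset.subset_union_left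

theorem pv_expand_mono (storage : List (String × List String)) {S T : Finset String}
    (h : S ⊆ T) : pvExpand storage S ⊆ pvExpand storage T := by
  unfold pvExpand
  exact Finset.union_subset_union h (Finset.biUnion_subset_biUnion_of_subset_left _ h)

theorem pv_grow_mono (storage : List (String × List String)) (n : Nat) {S T : Finset String}
    (h : S ⊆ T) : pvGrow storage n S ⊆ pvGrow storage n T := by
  induction n generalizing S T with
  | zero => exact h
  | succ n ih => exact ih (pv_expand_mono storage h)

theorem pv_grow_expand_comm (storage : List (String × List String)) (n : Nat) (S : Finset String) :
    pvGrow storage n (pvExpand storage S) = pvExpand storage (pvGrow storage n S) := by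
  induction n generalizing S with
  | zero => rfl
  | succ n ih => exact ih (pvExpand storage S)

theorem pv_grow_succ (storage : List (String × List String)) (n : Nat) (S : Finset String) :
    pvGrow storage (n + 1) S = pvExpand storage (pvGrow storage n S) :=
  pv_grow_expand_comm storage n S

theorem pv_subset_grow (storage : List (String × List String)) (n : Nat) (S : Finset String) :
    S ⊆ pvGrow storage n S := by
  induction n with
  | zero => exact fun x hx => hx
  | succ n ih =>
    rw [pv_grow_succ]
    exact ih.trans (pv_subset_expand storage _)

theorem pv_grow_fuel_mono (storage : List (String × List String)) {m n : Nat} (h : m ≤ n)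
    (S : Finset String) : pvGrow storage m S ⊆ pvGrow storage n S := by
  induction n with
  | zero =>
    have : m = 0 := Nat.le_zero.mp h
    subst this; exact Finset.Subset.refl _
  | succ n ih =>
    rcases Nat.lt_or_ge m (n + 1) with hlt | hge
    · rw [pv_grow_succ]
      exact (ih (Nat.lt_succ_iff.mp hlt)).trans (pv_subset_expand storage _)
    · have : m = n + 1 := Nat.le_antisymm h hge
      subst this; exact Finset.Subset.refl _

-- expand only looks at the storage keys inside S
theorem pv_expand_eq_inter (storage : List (String × List String)) (S : Finset String) :
    pvExpand storage S =
      S ∪ (S ∩ pvKeysF storage).biUnion (fun k => (pvChildren storage k).toFinset) := by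
  unfold pvExpand
  congr 1
  apply Finset.ext
  intro x
  simp only [Finset.mem_biUnion, Finset.mem_inter, List.mem_toFinset]
  constructor
  · rintro ⟨k, hkS, hx⟩
    refine ⟨k, ⟨hkS, ?_⟩, hx⟩
    by_contra hk
    rw [pv_children_nil storage k (by simpa [pvKeysF] using hk)] at hx
    simp at hx
  · rintro ⟨k, ⟨hkS, _⟩, hx⟩
    exact ⟨k, hkS, hx⟩

-- once expand fixes a stage, all later stages are equal to it
theorem pv_stable_propagate (storage : List (String × List String)) (n : Nat) (S : Finset String)
    (h : pvExpand storage (pvGrow storage n S) = pvGrow storage n S) :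
    ∀ m, n ≤ m → pvGrow storage m S = pvGrow storage n S := by
  intro m hm
  induction m with
  | zero =>
    have : n = 0 := Nat.le_zero.mp hm
    subst this; rfl
  | succ m ih =>
    rcases Nat.lt_or_ge n (m + 1) with hlt | hge
    · have hnm : n ≤ m := Nat.lt_succ_iff.mp hlt
      rw [pv_grow_succ, ih hnm, h]
    · have : n = m + 1 := Nat.le_antisymm hm hge
      subst this; rfl

-- if the set of reached storage keys stops growing, the whole stage stabilises
theorem pv_T_eq_stable (storage : List (String × List String)) (n : Nat) (S : Finset String)
    (h : pvGrow storage n S ∩ pvKeysF storage = pvGrow storage (n + 1) S ∩ pvKeysF storage) :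
    pvExpand storage (pvGrow storage (n + 1) S) = pvGrow storage (n + 1) S := by
  rw [pv_expand_eq_inter, ← h]
  apply Finset.union_eq_left.mpr
  have : (pvGrow storage n S ∩ pvKeysF storage).biUnion
      (fun k => (pvChildren storage k).toFinset) ⊆ pvExpand storage (pvGrow storage n S) := by
    rw [pv_expand_eq_inter]
    exact Finset.subset_union_right
  rw [pv_grow_succ]
  exact this

theorem pv_card_T_ge (storage : List (String × List String)) (S : Finset String) :
    ∀ n, (∀ i, i < n → pvGrow storage i S ∩ pvKeysF storage ≠ pvGrow storage (i + 1) S ∩ pvKeysF storage) →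
      n ≤ (pvGrow storage n S ∩ pvKeysF storage).card := by
  intro n
  induction n with
  | zero => intro _; exact Nat.zero_le _
  | succ n ih =>
    intro h
    have hsub : pvGrow storage n S ∩ pvKeysF storage ⊆ pvGrow storage (n + 1) S ∩ pvKeysF storage :=
      Finset.inter_subset_inter (pv_grow_fuel_mono storage (Nat.le_succ n) S) (Finset.Subset.refl _)
    have hne := h n (Nat.lt_succ_self n)
    have hss : pvGrow storage n S ∩ pvKeysF storage ⊂ pvGrow storage (n + 1) S ∩ pvKeysF storage :=
      ⟨hsub, fun hsub' => hne (Finset.Subset.antisymm hsub hsub')⟩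
    have h1 := ih (fun i hi => h i (Nat.lt_succ_of_lt hi))
    have h2 := Finset.card_lt_card hss
    omega

theorem pv_reach_saturated (storage : List (String × List String)) (k : String) :
    pvExpand storage (pvReach storage k) = pvReach storage k := by
  have hcard : (pvKeysF storage).card ≤ storage.length := by
    calc (pvKeysF storage).card ≤ (storage.map Prod.fst).length := List.toFinset_card_le _
      _ = storage.length := List.length_map ..
  have hex : ∃ n, n ≤ storage.length ∧
      pvGrow storage n {k} ∩ pvKeysF storage = pvGrow storage (n + 1) {k} ∩ pvKeysF storage := by
    by_contra hno
    push Not at hno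
    have := pv_card_T_ge storage {k} (storage.length + 1) (fun i hi => hno i (Nat.lt_succ_iff.mp hi))
    have hle : (pvGrow storage (storage.length + 1) {k} ∩ pvKeysF storage).card ≤ (pvKeysF storage).card :=
      Finset.card_le_card Finset.inter_subset_right
    omega
  obtain ⟨n, hn, hT⟩ := hex
  have hst := pv_T_eq_stable storage n {k} hT
  have h1 : pvGrow storage (storage.length + 1) {k} = pvGrow storage (n + 1) {k} :=
    pv_stable_propagate storage (n + 1) {k} hst (storage.length + 1) (by omega)
  show pvExpand storage (pvGrow storage (storage.length + 1) {k}) = pvGrow storage (storage.length + 1) {k}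
  rw [h1, hst]

theorem pv_reach_self (storage : List (String × List String)) (k : String) :
    k ∈ pvReach storage k :=
  pv_subset_grow storage (storage.length + 1) {k} (Finset.mem_singleton_self k)

theorem pv_mem_expand_child (storage : List (String × List String)) {k p : String}
    (hp : p ∈ pvChildren storage k) : p ∈ pvExpand storage {k} := by
  unfold pvExpand
  apply Finset.mem_union_right
  exact Finset.mem_biUnion.mpr ⟨k, Finset.mem_singleton_self k, List.mem_toFinset.mpr hp⟩

theorem pv_reach_child_subset (storage : List (String × List String)) {k p : String}
    (hp : p ∈ pvChildren storage k) : pvReach storage p ⊆ pvReach storage k := by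
  have h1 : pvReach storage p ⊆ pvGrow storage (storage.length + 1) (pvExpand storage {k}) :=
    pv_grow_mono storage (storage.length + 1) (Finset.singleton_subset_iff.mpr (pv_mem_expand_child storage hp))
  have h2 : pvGrow storage (storage.length + 1) (pvExpand storage {k})
      = pvExpand storage (pvReach storage k) :=
    pv_grow_expand_comm storage (storage.length + 1) {k}
  rw [pv_reach_saturated storage k] at h2
  exact h1.trans (le_of_eq h2)

theorem pv_child_mem_reach (storage : List (String × List String)) {k p : String}
    (hp : p ∈ pvChildren storage k) : p ∈ pvReach storage k := by
  have h1 : pvExpand storage {k} ⊆ pvGrow storage (storage.length + 1) {k} := by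
    have := pv_subset_grow storage storage.length (pvExpand storage {k})
    exact this
  exact h1 (pv_mem_expand_child storage hp)

theorem pv_grow_of_stable (storage : List (String × List String)) {S : Finset String}
    (h : pvExpand storage S = S) : ∀ n, pvGrow storage n S = S := by
  intro n
  induction n with
  | zero => rfl
  | succ n ih =>
    show pvGrow storage n (pvExpand storage S) = S
    rw [h, ih]

theorem pv_reach_trans (storage : List (String × List String)) {k j : String}
    (hj : j ∈ pvReach storage k) : pvReach storage j ⊆ pvReach storage k := by
  have h1 : pvReach storage j ⊆ pvGrow storage (storage.length + 1) (pvReach storage k) :=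
    pv_grow_mono storage (storage.length + 1) (Finset.singleton_subset_iff.mpr hj)
  rw [pv_grow_of_stable storage (pv_reach_saturated storage k)] at h1
  exact h1

theorem pv_rank_le (storage : List (String × List String)) (k : String) :
    pvRank storage k ≤ storage.length := by
  unfold pvRank
  calc (pvReach storage k ∩ pvKeysF storage).card
      ≤ (pvKeysF storage).card := Finset.card_le_card Finset.inter_subset_right
    _ ≤ (storage.map Prod.fst).length := List.toFinset_card_le _
    _ = storage.length := List.length_map ..

theorem pv_rank_lt (storage : List (String × List String)) {key k p : String} {fields : List String}
    (hPre : Pre_dependency_graph key storage) (hkr : k ∈ pvReach storage key)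
    (hl : List.lookup k storage = some fields) (hp : p ∈ fields) :
    pvRank storage p < pvRank storage k := by
  have hkmem : k ∈ storage.map Prod.fst := (pv_lookup_isSome storage k).mp (by simp [hl])
  have hchild : pvChildren storage k = fields := by unfold pvChildren; rw [hl]; rfl
  have hp' : p ∈ pvChildren storage k := by rw [hchild]; exact hp
  have hknotin : k ∉ pvReach storage p := hPre k hkmem hkr p hp'
  apply Finset.card_lt_card
  refine ⟨Finset.inter_subset_inter (pv_reach_child_subset storage hp') (Finset.Subset.refl _), ?_⟩
  intro hsub
  exact hknotin (Finset.mem_of_mem_inter_left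
    (hsub (Finset.mem_inter.mpr ⟨pv_reach_self storage k, List.mem_toFinset.mpr hkmem⟩)))

theorem pv_field_mem_reach (storage : List (String × List String)) {key k p : String}
    {fields : List String} (hkr : k ∈ pvReach storage key)
    (hl : List.lookup k storage = some fields) (hp : p ∈ fields) :
    p ∈ pvReach storage key := by
  have hchild : p ∈ pvChildren storage k := by unfold pvChildren; rw [hl]; exact hp
  exact pv_reach_trans storage hkr (pv_child_mem_reach storage hchild)

-- A's result does not depend on the fuel, as long as the fuel exceeds the rank
theorem pv_depA_stable (storage : List (String × List String)) (key : String)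
    (hPre : Pre_dependency_graph key storage) :
    ∀ f₁ f₂ k, k ∈ pvReach storage key → pvRank storage k < f₁ → pvRank storage k < f₂ →
      pvDepA f₁ k storage = pvDepA f₂ k storage := by
  intro f₁
  induction f₁ with
  | zero => intro f₂ k _ h1; omega
  | succ n ih =>
    intro f₂ k hkr h1 h2
    cases f₂ with
    | zero => omega
    | succ m =>
      show pvDepA (n + 1) k storage = pvDepA (m + 1) k storage
      simp only [pvDepA]
      cases hl : List.lookup k storage with
      | none => rfl
      | some fields =>
        apply PySem.List.foldl_congr_mem
        intro acc p hp
        have hpr : p ∈ pvReach storage key := pv_field_mem_reach storage hkr hl hp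
        have hrp : pvRank storage p < pvRank storage k := pv_rank_lt storage hPre hkr hl hp
        rw [ih n p hpr (by omega) (by omega), ih m p hpr (by omega) (by omega)]

theorem pv_depA_eq_val (storage : List (String × List String)) {key : String}
    (hPre : Pre_dependency_graph key storage) {f : Nat} {k : String}
    (hkr : k ∈ pvReach storage key)
    (hf : pvRank storage k < f) : pvDepA f k storage = pvVal storage k :=
  pv_depA_stable storage key hPre f (pvRank storage k + 1) k hkr hf (Nat.lt_succ_self _)

theorem pv_val_none (storage : List (String × List String)) {k : String}
    (hl : List.lookup k storage = none) : pvVal storage k = [] := by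
  unfold pvVal
  simp only [pvDepA, hl]

theorem pv_val_some (storage : List (String × List String)) {key : String}
    (hPre : Pre_dependency_graph key storage) {k : String} {fields : List String}
    (hkr : k ∈ pvReach storage key)
    (hl : List.lookup k storage = some fields) :
    pvVal storage k = fields ++ fields.flatMap (pvVal storage) := by
  have h0 : pvVal storage k = fields.foldl (fun out pkey =>
      let new_fields := pvDepA (pvRank storage k) pkey storage
      if new_fields ≠ [] then out ++ new_fields else out) ([] ++ fields) := by
    unfold pvVal
    simp only [pvDepA, hl]
  rw [h0]
  have h1 : fields.foldl (fun out pkey =>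
        let new_fields := pvDepA (pvRank storage k) pkey storage
        if new_fields ≠ [] then out ++ new_fields else out) ([] ++ fields)
      = fields.foldl (fun out pkey => out ++ pvVal storage pkey) ([] ++ fields) := by
    apply PySem.List.foldl_congr_mem
    intro acc p hp
    have hpr : p ∈ pvReach storage key := pv_field_mem_reach storage hkr hl hp
    have hrp : pvRank storage p < pvRank storage k := pv_rank_lt storage hPre hkr hl hp
    rw [pv_depA_eq_val storage hPre hpr hrp]
    by_cases h : pvVal storage p = []
    · simp [h]
    · simp [h]
  rw [h1, PySem.List.foldl_append_eq_flatMap]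
  simp

theorem pv_depB_correct (storage : List (String × List String)) (key : String)
    (hPre : Pre_dependency_graph key storage) :
    ∀ f k cache, pvInv storage cache → k ∈ pvReach storage key → pvRank storage k < f →
      (pvDepB f cache k storage).1 = pvVal storage k ∧
      pvInv storage (pvDepB f cache k storage).2 := by
  intro f
  induction f with
  | zero => intro k cache _ _ h; omega
  | succ n ih =>
    intro k cache hInv hkr hf
    cases hc : PySem.Dict.get? cache k with
    | some v =>
      have hred : pvDepB (n + 1) cache k storage = (v, cache) := by
        simp only [pvDepB, hc]
      rw [hred]
      exact ⟨hInv k v hc, hInv⟩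
    | none =>
      cases hl : List.lookup k storage with
      | none =>
        have hred : pvDepB (n + 1) cache k storage = ([], cache) := by
          simp only [pvDepB, hc, hl]
        rw [hred]
        exact ⟨(pv_val_none storage hl).symm, hInv⟩
      | some fields =>
        have hred : pvDepB (n + 1) cache k storage =
            ((fields.foldl (fun (st : List String × PySem.Dict String (List String)) p =>
                let q := pvDepB n st.2 p storage
                (st.1 ++ q.1, q.2)) (fields, cache)).1,
             (fields.foldl (fun (st : List String × PySem.Dict String (List String)) p =>
                let q := pvDepB n st.2 p storage
                (st.1 ++ q.1, q.2)) (fields, cache)).2.insert k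
             (fields.foldl (fun (st : List String × PySem.Dict String (List String)) p =>
                let q := pvDepB n st.2 p storage
                (st.1 ++ q.1, q.2)) (fields, cache)).1) := by
          simp only [pvDepB, hc, hl]
        rw [hred]
        have hstep : ∀ (l : List String),
            (∀ p ∈ l, pvRank storage p < n ∧ p ∈ pvReach storage key) →
            ∀ (acc : List String) (c : PySem.Dict String (List String)), pvInv storage c →
            (l.foldl (fun (st : List String × PySem.Dict String (List String)) p =>
                let q := pvDepB n st.2 p storage
                (st.1 ++ q.1, q.2)) (acc, c)).1 = acc ++ l.flatMap (pvVal storage) ∧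
            pvInv storage ((l.foldl (fun (st : List String × PySem.Dict String (List String)) p =>
                let q := pvDepB n st.2 p storage
                (st.1 ++ q.1, q.2)) (acc, c)).2) := by
          intro l
          induction l with
          | nil =>
            intro _ acc c hc'
            exact ⟨by simp, hc'⟩
          | cons p t iht =>
            intro hlt acc c hc'
            obtain ⟨hrp, hpr⟩ := hlt p (List.mem_cons_self ..)
            obtain ⟨hq1, hq2⟩ := ih p c hc' hpr hrp
            simp only [List.foldl_cons, List.flatMap_cons]
            obtain ⟨ht1, ht2⟩ := iht (fun x hx => hlt x (List.mem_cons_of_mem p hx))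
              (acc ++ (pvDepB n c p storage).1) (pvDepB n c p storage).2 hq2
            refine ⟨?_, ht2⟩
            rw [ht1, hq1, List.append_assoc]
        have hfields : ∀ p ∈ fields, pvRank storage p < n ∧ p ∈ pvReach storage key := by
          intro p hp
          have h1 := pv_rank_lt storage hPre hkr hl hp
          exact ⟨by omega, pv_field_mem_reach storage hkr hl hp⟩
        obtain ⟨h1, h2⟩ := hstep fields hfields fields cache hInv
        constructor
        · rw [h1, pv_val_some storage hPre hkr hl]
        · intro j v hj
          rw [PySem.Dict.get?_insert] at hj
          by_cases hjk : j = k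
          · simp only [hjk] at hj
            cases hj
            rw [h1, hjk]
            exact (pv_val_some storage hPre hkr hl).symm
          · rw [if_neg hjk] at hj
            exact h2 j v hj

-- ===== VERDICT (by name: the statement is the Claim_ definition above) =====
theorem dependency_graph_spec : Claim_equal_dependency_graph := by
  intro key storage _ hPre
  show dependency_graph key storage = dependency_graph_alt key storage
  unfold dependency_graph dependency_graph_alt
  have hself : key ∈ pvReach storage key := pv_reach_self storage key
  have hrank : pvRank storage key < storage.length + 1 :=
    Nat.lt_succ_of_le (pv_rank_le storage key)
  have hA : pvDepA (storage.length + 1) key storage = pvVal storage key :=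
    pv_depA_eq_val storage hPre hself hrank
  have hEmpty : pvInv storage PySem.Dict.empty := by
    intro j v hj
    simp [PySem.Dict.get?_empty] at hj
  have hB := pv_depB_correct storage key hPre (storage.length + 1) key PySem.Dict.empty hEmpty hself hrank
  rw [hA, hB.1]
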